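-- pv_equiv track=rewrite | github.com/geaxgx/depthai_movenet | MovenetDepthaiEdge.py | find_isp_scale_params
-- ===== SOURCE A (Python) =====
-- from math import gcd
--
-- def find_isp_scale_params(size):
--     # We want size >= 288
--     if size < 288:
--         size = 288
--
--     # We are looking for the list on integers that are divisible by 16 and
--     # that can be written like n/d where n <= 16 and d <= 63
--     size_candidates = {}
--     for s in range(288,1080,16):
--         f = gcd(1080, s)
--         n = s//f
--         d = 1080//f
--         if n <= 16 and d <= 63:
--             size_candidates[s] = (n, d)
--     # What is the candidate size closer to 'size' ?
--     min_dist = -1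
--     for s in size_candidates:
--         dist = abs(size - s)
--         if min_dist == -1:
--             min_dist = dist
--             candidate = s
--         else:
--             if dist > min_dist: break
--             candidate = s
--             min_dist = dist
--     return candidate, size_candidates[candidate]
-- ===== SOURCE B (Python) =====
-- from math import gcd
--
-- def find_isp_scale_params(size):
--     # Single pass: merge candidate generation and nearest search; no intermediate dict.
--     if size < 288:
--         size = 288
--     best_s = best_nd = best_dist = None
--     for s in range(288, 1080, 16):
--         f = gcd(1080, s)
--         n = s // f
--         d = 1080 // f
--         if n > 16 or d > 63:
--             continue
--         dist = abs(size - s)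
--         if best_dist is None or dist <= best_dist:
--             best_s, best_nd, best_dist = s, (n, d), dist
--     return best_s, best_nd
-- ===== Notes on version B (the rewrite author's own statement) =====
-- stated objective: simpler
-- what changed: B merges A's two passes (build a dict of candidate sizes, then a second break-on-increase nearest scan over its keys plus a final dict lookup) into one single pass over the same 16-step size range that skips non-candidates and keeps (best_s, best_nd, best_dist), with a tie rule 'dist <= best_dist' that keeps the later (larger) size like A does; the intermediate dict disappears.
import Mathlib
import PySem

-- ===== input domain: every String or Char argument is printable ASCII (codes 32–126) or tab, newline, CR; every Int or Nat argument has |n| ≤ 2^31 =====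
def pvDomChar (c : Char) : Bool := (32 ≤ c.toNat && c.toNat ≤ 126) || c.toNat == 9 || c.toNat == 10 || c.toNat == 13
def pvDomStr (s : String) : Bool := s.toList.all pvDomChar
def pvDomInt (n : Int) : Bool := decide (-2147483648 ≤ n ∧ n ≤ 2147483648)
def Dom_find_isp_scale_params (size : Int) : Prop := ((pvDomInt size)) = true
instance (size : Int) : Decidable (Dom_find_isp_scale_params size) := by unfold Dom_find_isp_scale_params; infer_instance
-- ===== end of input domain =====

-- B replaces A's dict-building pass plus a second break-on-increase nearest scan by one
-- merged single pass keeping (best_s, best_nd, best_dist); objective: simpler (no intermediate dict).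

-- ===== PORT A =====
-- A's first loop: builds the dict of candidate sizes (size-independent, hence a constant here)
def pvCandidates : PySem.Dict Int (Int × Int) :=
  (PySem.List.pyRange 288 1080 16).foldl (fun dct s =>
    let f : Int := (Int.gcd 1080 s : Int)
    let n := PySem.Int.floordiv s f
    let d := PySem.Int.floordiv 1080 f
    if n ≤ 16 ∧ d ≤ 63 then dct.insert s (n, d) else dct) PySem.Dict.empty

-- A's second loop ('for s in size_candidates: … break'): state (min_dist, candidate);
-- candidate is Option because it is unbound before the first iteration.
def pvLoopA (size : Int) : List Int → Int → Option Int → Int × Option Int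
  | [], min_dist, cand => (min_dist, cand)
  | s :: rest, min_dist, cand =>
      let dist := |size - s|
      if min_dist = -1 then pvLoopA size rest dist (some s)
      else if dist > min_dist then (min_dist, cand)   -- break
      else pvLoopA size rest dist (some s)

def find_isp_scale_params (size : Int) : Int × (Int × Int) :=
  let size := if size < 288 then (288 : Int) else size
  let r := pvLoopA size pvCandidates.keys (-1) none
  match r.2 with
  | some c =>
    match pvCandidates.get? c with
    | some v => (c, v)
    | none => (0, (0, 0))  -- unreachable: candidate is always a key of the dict
  | none => (0, (0, 0))    -- unreachable: the dict is never empty (Python: NameError)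

-- ===== PORT B =====
-- B's single loop body: skip non-candidates, keep the best (s, (n,d), dist) so far
def pvStepB (size : Int) (best : Option (Int × ((Int × Int) × Int))) (s : Int) :
    Option (Int × ((Int × Int) × Int)) :=
  let f : Int := (Int.gcd 1080 s : Int)
  let n := PySem.Int.floordiv s f
  let d := PySem.Int.floordiv 1080 f
  if n > 16 ∨ d > 63 then best
  else
    let dist := |size - s|
    match best with
    | none => some (s, ((n, d), dist))
    | some (_, (_, bdist)) => if dist ≤ bdist then some (s, ((n, d), dist)) else best

-- B's final 'return best_s, best_nd'
def pvFinishB : Option (Int × ((Int × Int) × Int)) → Int × (Int × Int)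
  | some (s, (nd, _)) => (s, nd)
  | none => (0, (0, 0))   -- unreachable: some s is always accepted (Python: (None, None))

def find_isp_scale_params_alt (size : Int) : Int × (Int × Int) :=
  let size := if size < 288 then (288 : Int) else size
  pvFinishB ((PySem.List.pyRange 288 1080 16).foldl (pvStepB size) none)

-- ===== PRECONDITION & SPEC =====
def Spec_find_isp_scale_params (size : Int) (out : Int × (Int × Int)) : Prop := out = find_isp_scale_params_alt size
instance (size : Int) (out : Int × (Int × Int)) : Decidable (Spec_find_isp_scale_params size out) := by unfold Spec_find_isp_scale_params; infer_instance

-- ===== CLAIM (what is proved, stated in full; the proofs are below) =====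
def Claim_equal_find_isp_scale_params : Prop := ∀ (size : Int), Dom_find_isp_scale_params size → Spec_find_isp_scale_params size (find_isp_scale_params size)

-- ===== LEMMAS AND PROOFS =====

-- all clamped sizes from 288 up to the largest candidate 1008, checked one by one
set_option maxRecDepth 20000 in
theorem pv_small_case : ∀ k : Fin 721,
    find_isp_scale_params (288 + (k : Int)) = find_isp_scale_params_alt (288 + (k : Int)) := by
  decide

-- the value pvStepB keeps for an accepted s (used to state the fold lemma)
def pvAcceptVal (s : Int) : Option (Int × (Int × Int)) :=
  let f : Int := (Int.gcd 1080 s : Int)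
  let n := PySem.Int.floordiv s f
  let d := PySem.Int.floordiv 1080 f
  if n > 16 ∨ d > 63 then none else some (s, (n, d))

-- A's second loop, once min_dist ≥ 0, never breaks when all remaining sizes are ≤ size
-- (distance keeps shrinking along the ascending list), so the last element wins.
theorem pv_loopA_run (size : Int) (l : List Int) :
    ∀ (md c : Int), 0 ≤ md → (∀ s ∈ l, s ≤ size) →
    (∀ s, l.head? = some s → size - s ≤ md) → l.Pairwise (· ≤ ·) →
    (pvLoopA size l md (some c)).2 = some (l.getLastD c) := by
  induction l with
  | nil => intro md c _ _ _ _; rfl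
  | cons s rest ih =>
    intro md c h0 hle hhd hp
    have hs : s ≤ size := hle s (by simp)
    have hmd : size - s ≤ md := hhd s rfl
    rw [pvLoopA]
    simp only [abs_of_nonneg (by omega : (0:Int) ≤ size - s)]
    rw [if_neg (by omega), if_neg (by omega)]
    rw [List.getLastD_cons]
    exact ih (size - s) s (by omega) (fun t ht => hle t (by simp [ht]))
      (fun t ht => by
        rcases rest with _ | ⟨r, rest'⟩
        · simp at ht
        · simp at ht; subst ht
          have : s ≤ r := (List.pairwise_cons.mp hp).1 r (by simp)
          omega)
      (List.Pairwise.of_cons hp)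

-- B's fold, once the state holds (bs,(nd, size-bs)) with bs below every remaining s ≤ size,
-- accepts every candidate it meets (distance keeps shrinking), so the last accepted one wins.
theorem pv_foldB_run (size : Int) (l : List Int) :
    ∀ (bs : Int) (nd : Int × Int),
    (∀ s ∈ l, pvAcceptVal s ≠ none → s ≤ size) → (∀ s ∈ l, bs ≤ s) →
    l.Pairwise (· ≤ ·) →
    l.foldl (pvStepB size) (some (bs, (nd, size - bs))) =
      some (match (l.filterMap pvAcceptVal).getLast? with
            | none => (bs, (nd, size - bs))
            | some (s, nd') => (s, (nd', size - s))) := by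
  induction l with
  | nil => intro bs nd _ _ _; rfl
  | cons s rest ih =>
    intro bs nd hle hbs hp
    have hbss : bs ≤ s := hbs s (by simp)
    rw [List.foldl_cons, List.filterMap_cons]
    by_cases hacc : (PySem.Int.floordiv s (Int.gcd 1080 s : Int) > 16 ∨
                     PySem.Int.floordiv 1080 (Int.gcd 1080 s : Int) > 63)
    · have h1 : pvStepB size (some (bs, (nd, size - bs))) s = some (bs, (nd, size - bs)) := by
        rw [pvStepB, if_pos hacc]
      have h2 : pvAcceptVal s = none := by rw [pvAcceptVal, if_pos hacc]
      rw [h1, h2]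
      exact ih bs nd (fun t ht => hle t (by simp [ht])) (fun t ht => hbs t (by simp [ht]))
        (List.Pairwise.of_cons hp)
      
    · have hs : s ≤ size := hle s (by simp)
        (by rw [pvAcceptVal, if_neg hacc]; simp)
      have h1 : pvStepB size (some (bs, (nd, size - bs))) s =
          some (s, ((PySem.Int.floordiv s (Int.gcd 1080 s : Int),
                     PySem.Int.floordiv 1080 (Int.gcd 1080 s : Int)), size - s)) := by
        rw [pvStepB, if_neg hacc]
        simp only [abs_of_nonneg (by omega : (0:Int) ≤ size - s)]
        rw [if_pos (by omega)]
      have h2 : pvAcceptVal s = some (s, (PySem.Int.floordiv s (Int.gcd 1080 s : Int),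
                     PySem.Int.floordiv 1080 (Int.gcd 1080 s : Int))) := by
        rw [pvAcceptVal, if_neg hacc]
      rw [h1, h2]
      rw [ih s _ (fun t ht => hle t (by simp [ht]))
            (fun t ht => (List.pairwise_cons.mp hp).1 t ht) (List.Pairwise.of_cons hp)]
      rcases hlast : (rest.filterMap pvAcceptVal).getLast? with _ | ⟨t, nd''⟩
      · have hnil := List.getLast?_eq_none_iff.mp hlast
        simp [hnil]
      · simp [List.getLast?_cons, hlast]

-- A's second loop never breaks when size is at least the largest candidate: one explicit
-- first step (min_dist = -1), then pv_loopA_run on the rest of the ascending key list.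
theorem pv_loopA_start (size s : Int) (rest : List Int) (hs : s ≤ size)
    (hle : ∀ t ∈ rest, t ≤ size) (hhd : ∀ t, rest.head? = some t → s ≤ t)
    (hp : rest.Pairwise (· ≤ ·)) :
    (pvLoopA size (s :: rest) (-1) none).2 = some (rest.getLastD s) := by
  rw [pvLoopA]
  simp only [abs_of_nonneg (show (0:Int) ≤ size - s by omega), if_true]
  exact pv_loopA_run size rest (size - s) s (by omega) hle
    (fun t ht => by have := hhd t ht; omega) hp

set_option maxHeartbeats 2000000 in
theorem pv_high_case (size : Int) (h : 1008 ≤ size) :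
    find_isp_scale_params size = find_isp_scale_params_alt size := by
  have hkeys : pvCandidates.keys = [288, 320, 336, 384, 400, 432, 480, 560, 576, 640, 720, 864, 960, 1008] := by decide
  have hA : find_isp_scale_params size = (1008, (14, 15)) := by
    have hr : (pvLoopA size pvCandidates.keys (-1) none).2 = some 1008 := by
      rw [hkeys]
      rw [pv_loopA_start size 288 _ (by omega)
        (fun t ht => by simp at ht; omega)
        (fun t ht => by simp at ht; omega)
        (by decide)]
      decide
    simp only [find_isp_scale_params]
    rw [if_neg (by omega), hr]
    simp [show pvCandidates.get? 1008 = some (14, 15) from by decide]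
  have hB : find_isp_scale_params_alt size = (1008, (14, 15)) := by
    have hR : PySem.List.pyRange 288 1080 16 = [288, 304, 320, 336, 352, 368, 384, 400, 416, 432, 448, 464, 480, 496, 512, 528, 544, 560, 576, 592, 608, 624, 640, 656, 672, 688, 704, 720, 736, 752, 768, 784, 800, 816, 832, 848, 864, 880, 896, 912, 928, 944, 960, 976, 992, 1008, 1024, 1040, 1056, 1072] := by decide
    have hall : ∀ t ∈ ([304, 320, 336, 352, 368, 384, 400, 416, 432, 448, 464, 480, 496, 512, 528, 544, 560, 576, 592, 608, 624, 640, 656, 672, 688, 704, 720, 736, 752, 768, 784, 800, 816, 832, 848, 864, 880, 896, 912, 928, 944, 960, 976, 992, 1008, 1024, 1040, 1056, 1072] : List Int), pvAcceptVal t ≠ none → t ≤ 1008 := by decide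
    have hg : ((Int.gcd 1080 288 : Nat) : Int) = 72 := by decide
    have hn : PySem.Int.floordiv 288 72 = 4 := by decide
    have hd : PySem.Int.floordiv 1080 72 = 15 := by decide
    have hstep : pvStepB size none 288 = some (288, ((4, 15), size - 288)) := by
      rw [pvStepB, hg, hn, hd, if_neg (by norm_num)]
      rw [abs_of_nonneg (show (0:Int) ≤ size - 288 by omega)]
    have hfold : (PySem.List.pyRange 288 1080 16).foldl (pvStepB size) none =
        some (1008, ((14, 15), size - 1008)) := by
      rw [hR, List.foldl_cons, hstep]
      rw [pv_foldB_run size [304, 320, 336, 352, 368, 384, 400, 416, 432, 448, 464, 480, 496, 512, 528, 544, 560, 576, 592, 608, 624, 640, 656, 672, 688, 704, 720, 736, 752, 768, 784, 800, 816, 832, 848, 864, 880, 896, 912, 928, 944, 960, 976, 992, 1008, 1024, 1040, 1056, 1072] 288 (4, 15)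
        (fun t ht hacc => by have := hall t ht hacc; omega)
        (fun t ht => by simp at ht; omega)
        (by decide)]
      rw [show (([304, 320, 336, 352, 368, 384, 400, 416, 432, 448, 464, 480, 496, 512, 528, 544, 560, 576, 592, 608, 624, 640, 656, 672, 688, 704, 720, 736, 752, 768, 784, 800, 816, 832, 848, 864, 880, 896, 912, 928, 944, 960, 976, 992, 1008, 1024, 1040, 1056, 1072] : List Int).filterMap pvAcceptVal).getLast? = some (1008, (14, 15)) from by decide]
    simp only [find_isp_scale_params_alt]
    rw [if_neg (by omega), hfold]
    rfl
  rw [hA, hB]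

-- ===== VERDICT (by name: the statement is the Claim_ definition above) =====
theorem find_isp_scale_params_spec : Claim_equal_find_isp_scale_params := by
  intro size _
  unfold Spec_find_isp_scale_params
  by_cases h1 : size < 288
  · have hA : find_isp_scale_params size = find_isp_scale_params 288 := by
      simp only [find_isp_scale_params]
      rw [if_pos h1, if_neg (by norm_num)]
    have hB : find_isp_scale_params_alt size = find_isp_scale_params_alt 288 := by
      simp only [find_isp_scale_params_alt]
      rw [if_pos h1, if_neg (by norm_num)]
    have h0 : find_isp_scale_params 288 = find_isp_scale_params_alt 288 :=
      pv_small_case ⟨0, by norm_num⟩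
    rw [hA, hB, h0]
  · by_cases h2 : size ≤ 1008
    · have hk : ((size - 288).toNat : Int) = size - 288 := by omega
      have h3 : find_isp_scale_params (288 + ((size - 288).toNat : Int)) =
          find_isp_scale_params_alt (288 + ((size - 288).toNat : Int)) :=
        pv_small_case ⟨(size - 288).toNat, by omega⟩
      rw [hk, show (288 : Int) + (size - 288) = size from by ring] at h3
      exact h3
    · exact pv_high_case size (by omega)
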